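-- pv_equiv track=rewrite | github.com/IrsIris501/25spring_DSAlgo | python_code/lc2680.py | maximumOr
-- ===== SOURCE A (Python) =====
-- from collections import deque
--
-- def maximumOr(nums: list[int], k: int) -> int:
--     n = len(nums)
--     prefix = [0]
--     suffix = deque()
--     temp = 0
--     for i in range(n):
--         temp |= nums[i]
--         prefix.append(temp)
--     temp = 0
--     for i in range(n-1, -1, -1):
--         temp |= nums[i]
--         suffix.appendleft(temp)
--     suffix.append(0)
--     ans = 0
--     for i in range(n):
--         ans = max(ans, prefix[i] | (nums[i] << k) | suffix[i+1])
--     return ans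
-- ===== SOURCE B (Python) =====
-- def maximumOr(nums: list[int], k: int) -> int:
--     # Order-free "shared bits" trick instead of prefix/suffix tables:
--     # total = OR of all elements, multi = OR of the bits set in at least
--     # two elements; then OR of all elements except x is multi | (total & ~x).
--     total = multi = 0
--     for x in nums:
--         multi |= total & x
--         total |= x
--     ans = 0
--     for x in nums:
--         ans = max(ans, multi | (total & ~x) | (x << k))
--     return ans
-- ===== Notes on version B (the rewrite author's own statement) =====
-- stated objective: alternative
-- what changed: Replaces A's positional prefix-OR list and suffix-OR deque (three index-driven passes) by an order-free bit-sharing trick: one pass computes total = OR of all elements and multi = OR of bits set in at least two elements, and the OR of all elements except x is then reconstructed as multi | (total & ~x), so no prefix/suffix tables or index arithmetic exist at all.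
import Mathlib
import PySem

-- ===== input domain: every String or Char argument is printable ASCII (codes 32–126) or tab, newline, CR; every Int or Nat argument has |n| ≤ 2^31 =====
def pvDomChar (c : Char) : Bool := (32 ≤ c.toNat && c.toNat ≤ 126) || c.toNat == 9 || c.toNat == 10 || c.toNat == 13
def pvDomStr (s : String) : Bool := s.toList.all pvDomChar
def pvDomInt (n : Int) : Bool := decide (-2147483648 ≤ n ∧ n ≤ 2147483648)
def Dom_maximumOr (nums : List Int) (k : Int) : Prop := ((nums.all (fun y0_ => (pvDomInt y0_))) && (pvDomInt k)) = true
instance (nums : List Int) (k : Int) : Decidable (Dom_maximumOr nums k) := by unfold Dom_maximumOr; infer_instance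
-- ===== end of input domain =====

-- B replaces A's prefix-OR list and suffix-OR deque by an order-free bit-sharing trick
-- (total = OR of all, multi = bits set in >= 2 elements; OR-of-others = multi | (total & ~x));
-- alternative algorithm, same O(n) cost.

-- ===== PORT A =====
def maximumOr (nums : List Int) (k : Int) : Int :=
  let n : Int := PySem.List.len nums
  let ps := (PySem.List.pyRange 0 n 1).foldl
      (fun (st : List Int × Int) i =>
        let temp := PySem.Int.bor st.2 (PySem.List.pyGetD nums i 0)
        (st.1 ++ [temp], temp)) ([0], 0)
  let prefixL := ps.1
  let ss := (PySem.List.pyRange (n - 1) (-1) (-1)).foldl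
      (fun (st : List Int × Int) i =>
        let temp := PySem.Int.bor st.2 (PySem.List.pyGetD nums i 0)
        (temp :: st.1, temp)) ([], 0)
  let suffixL := ss.1 ++ [0]
  -- nums[i] << k : exact for 0 ≤ k (Pre_); Python raises on k < 0
  (PySem.List.pyRange 0 n 1).foldl
      (fun ans i =>
        max ans (PySem.Int.bor (PySem.Int.bor (PySem.List.pyGetD prefixL i 0)
                  ((PySem.List.pyGetD nums i 0) <<< k.toNat))
                 (PySem.List.pyGetD suffixL (i + 1) 0))) 0

-- ===== PORT B =====
def maximumOr_alt (nums : List Int) (k : Int) : Int :=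
  -- one pass: (total, multi); multi uses the OLD total, as in Source B
  let tm := nums.foldl
      (fun (st : Int × Int) x =>
        (PySem.Int.bor st.1 x, PySem.Int.bor st.2 (PySem.Int.band st.1 x))) (0, 0)
  -- x << k exact for 0 ≤ k (Pre_); ~x is Int.not
  nums.foldl
      (fun ans x =>
        max ans (PySem.Int.bor (PySem.Int.bor tm.2 (PySem.Int.band tm.1 (Int.not x)))
                  (x <<< k.toNat))) 0

-- ===== PRECONDITION & SPEC =====
-- Pre_ excludes k < 0 with nonempty nums: there Python's '<<' raises ValueError in A (and in B).
def Pre_maximumOr (nums : List Int) (k : Int) : Prop := 0 ≤ k ∨ nums = []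
instance (nums : List Int) (k : Int) : Decidable (Pre_maximumOr nums k) := by unfold Pre_maximumOr; infer_instance
def pvWitness_maximumOr : List Int × Int := ([12, 9, 3], 1)
def Spec_maximumOr (nums : List Int) (k : Int) (out : Int) : Prop := out = maximumOr_alt nums k
instance (nums : List Int) (k : Int) (out : Int) : Decidable (Spec_maximumOr nums k out) := by unfold Spec_maximumOr; infer_instance

-- ===== CLAIM (what is proved, stated in full; the proofs are below) =====
def Claim_equal_maximumOr : Prop := ∀ (nums : List Int) (k : Int), Dom_maximumOr nums k → Pre_maximumOr nums k → Spec_maximumOr nums k (maximumOr nums k)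

-- ===== LEMMAS AND PROOFS =====

-- ---- bit-level foundations ----
theorem pv_tb_natCast (n : Nat) (i : Nat) : Int.testBit (n : Int) i = n.testBit i := rfl
theorem pv_tb_negSucc (n : Nat) (i : Nat) : Int.testBit (Int.negSucc n) i = !(n.testBit i) := rfl

theorem pv_ldiff_add_and (n : Nat) : ∀ t : Nat, Nat.ldiff n t + (n &&& t) = n := by
  induction n using Nat.binaryRec with
  | zero =>
    intro t
    have h1 : Nat.ldiff 0 t = 0 := Nat.eq_of_testBit_eq fun i => by simp [Nat.testBit_ldiff]
    simp [h1]
  | bit b m ih =>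
    intro t
    conv_lhs => rw [← Nat.bit_bodd_div2 t]
    rw [Nat.ldiff_bit, Nat.land_bit]
    have := ih t.div2
    cases b <;> cases hb : t.bodd <;> simp [Nat.bit] <;> omega

theorem pv_sub_and (c t : Nat) : c - (c &&& t) = Nat.ldiff c t := by
  have := pv_ldiff_add_and c t
  omega

theorem pv_negSucc_eq (c : Nat) : -(c : Int) - 1 = Int.negSucc c := by
  rw [Int.negSucc_eq]; ring

theorem pv_neg_repr (a : Int) (h : ¬ 0 ≤ a) : a = Int.negSucc ((-a - 1).toNat) := by
  rw [Int.negSucc_eq]; omega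

theorem pv_nonneg_repr (a : Int) (h : 0 ≤ a) : a = ((a.toNat : Nat) : Int) := by omega

theorem pv_tb_bor (a b : Int) (i : Nat) :
    (PySem.Int.bor a b).testBit i = (a.testBit i || b.testBit i) := by
  unfold PySem.Int.bor
  by_cases ha : 0 ≤ a <;> by_cases hb : 0 ≤ b <;> simp only [ha, hb, if_true, if_false]
  · conv_rhs => rw [pv_nonneg_repr a ha, pv_nonneg_repr b hb]
    rw [pv_tb_natCast, pv_tb_natCast, pv_tb_natCast, Nat.testBit_lor]
  · rw [pv_sub_and, pv_negSucc_eq, pv_tb_negSucc]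
    conv_rhs => rw [pv_nonneg_repr a ha, pv_neg_repr b hb]
    rw [pv_tb_natCast, pv_tb_negSucc, Nat.testBit_ldiff]
    cases h1 : Nat.testBit ((-b - 1).toNat) i <;> cases h2 : Nat.testBit a.toNat i <;> simp
  · rw [pv_sub_and, pv_negSucc_eq, pv_tb_negSucc]
    conv_rhs => rw [pv_nonneg_repr b hb, pv_neg_repr a ha]
    rw [pv_tb_natCast, pv_tb_negSucc, Nat.testBit_ldiff]
    cases h1 : Nat.testBit ((-a - 1).toNat) i <;> cases h2 : Nat.testBit b.toNat i <;> simp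
  · rw [pv_negSucc_eq, pv_tb_negSucc]
    conv_rhs => rw [pv_neg_repr a ha, pv_neg_repr b hb]
    rw [pv_tb_negSucc, pv_tb_negSucc, Nat.testBit_land]
    cases h1 : Nat.testBit ((-a - 1).toNat) i <;> cases h2 : Nat.testBit ((-b - 1).toNat) i <;> simp

theorem pv_tb_band (a b : Int) (i : Nat) :
    (PySem.Int.band a b).testBit i = (a.testBit i && b.testBit i) := by
  unfold PySem.Int.band
  by_cases ha : 0 ≤ a <;> by_cases hb : 0 ≤ b <;> simp only [ha, hb, if_true, if_false]
  · conv_rhs => rw [pv_nonneg_repr a ha, pv_nonneg_repr b hb]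
    rw [pv_tb_natCast, pv_tb_natCast, pv_tb_natCast, Nat.testBit_land]
  · rw [pv_sub_and, pv_tb_natCast, Nat.testBit_ldiff]
    conv_rhs => rw [pv_nonneg_repr a ha, pv_neg_repr b hb]
    rw [pv_tb_natCast, pv_tb_negSucc]
  · rw [pv_sub_and, pv_tb_natCast, Nat.testBit_ldiff]
    conv_rhs => rw [pv_nonneg_repr b hb, pv_neg_repr a ha]
    rw [pv_tb_natCast, pv_tb_negSucc]
    cases h1 : Nat.testBit b.toNat i <;> cases h2 : Nat.testBit ((-a - 1).toNat) i <;> simp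
  · rw [pv_negSucc_eq, pv_tb_negSucc]
    conv_rhs => rw [pv_neg_repr a ha, pv_neg_repr b hb]
    rw [pv_tb_negSucc, pv_tb_negSucc, Nat.testBit_lor]
    cases h1 : Nat.testBit ((-a - 1).toNat) i <;> cases h2 : Nat.testBit ((-b - 1).toNat) i <;> simp

theorem pv_tb_not (a : Int) (i : Nat) : (Int.not a).testBit i = !(a.testBit i) := by
  cases a with
  | ofNat m => simp only [Int.not]; rfl
  | negSucc m => simp only [Int.not]; rw [pv_tb_negSucc]; simp [pv_tb_natCast]

theorem pv_ext (a b : Int) (h : ∀ i, a.testBit i = b.testBit i) : a = b := by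
  cases a with
  | ofNat m =>
    cases b with
    | ofNat n =>
      have : m = n := Nat.eq_of_testBit_eq fun i => h i
      simp [this]
    | negSucc n =>
      exfalso
      have hi := h (max m n)
      rw [pv_tb_negSucc] at hi
      rw [show Int.ofNat m = ((m : Nat) : Int) from rfl, pv_tb_natCast] at hi
      rw [Nat.testBit_eq_false_of_lt (lt_of_le_of_lt (le_max_left m n) (Nat.lt_two_pow_self)),
          Nat.testBit_eq_false_of_lt (lt_of_le_of_lt (le_max_right m n) (Nat.lt_two_pow_self))] at hi
      simp at hi
  | negSucc m =>
    cases b with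
    | ofNat n =>
      exfalso
      have hi := h (max m n)
      rw [pv_tb_negSucc] at hi
      rw [show Int.ofNat n = ((n : Nat) : Int) from rfl, pv_tb_natCast] at hi
      rw [Nat.testBit_eq_false_of_lt (lt_of_le_of_lt (le_max_left m n) (Nat.lt_two_pow_self)),
          Nat.testBit_eq_false_of_lt (lt_of_le_of_lt (le_max_right m n) (Nat.lt_two_pow_self))] at hi
      simp at hi
    | negSucc n =>
      have : m = n := Nat.eq_of_testBit_eq fun i => by
        have hi := h i
        rw [pv_tb_negSucc, pv_tb_negSucc] at hi
        simpa using hi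
      simp [this]

theorem pv_tb_zero (i : Nat) : (0 : Int).testBit i = false := by
  rw [show (0 : Int) = ((0 : Nat) : Int) from rfl, pv_tb_natCast, Nat.zero_testBit]

-- ---- fold characterizations by bits ----
theorem pv_tb_fold (i : Nat) : ∀ (l : List Int) (z : Int),
    ((l.foldl PySem.Int.bor z).testBit i = true) ↔
      (z.testBit i = true ∨ 0 < l.countP (fun x => x.testBit i)) := by
  intro l
  induction l with
  | nil => intro z; simp
  | cons x xs ih =>
    intro z
    rw [List.foldl_cons, ih, List.countP_cons, pv_tb_bor]
    by_cases hx : x.testBit i = true <;> simp [hx]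

-- B's one-pass fold: first component is the running OR
theorem pv_fold_fst : ∀ (l : List Int) (t0 m0 : Int),
    (l.foldl (fun (st : Int × Int) x =>
        (PySem.Int.bor st.1 x, PySem.Int.bor st.2 (PySem.Int.band st.1 x))) (t0, m0)).1
      = l.foldl PySem.Int.bor t0 := by
  intro l
  induction l with
  | nil => intro t0 m0; rfl
  | cons x xs ih => intro t0 m0; simp [List.foldl_cons, ih]

-- B's one-pass fold: second component holds exactly the bits seen at least twice
theorem pv_tb_multi (i : Nat) : ∀ (l : List Int) (t0 m0 : Int),
    (((l.foldl (fun (st : Int × Int) x =>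
        (PySem.Int.bor st.1 x, PySem.Int.bor st.2 (PySem.Int.band st.1 x))) (t0, m0)).2).testBit i = true) ↔
      (m0.testBit i = true ∨
       (t0.testBit i = true ∧ 0 < l.countP (fun x => x.testBit i)) ∨
       2 ≤ l.countP (fun x => x.testBit i)) := by
  intro l
  induction l with
  | nil => intro t0 m0; simp
  | cons x xs ih =>
    intro t0 m0
    rw [List.foldl_cons, ih, List.countP_cons, pv_tb_bor, pv_tb_band, pv_tb_bor]
    by_cases hx : x.testBit i = true <;> by_cases hc : 0 < xs.countP (fun x => x.testBit i) <;>
      simp [hx, hc]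
    · exact Or.inr (Or.inr (by simpa using List.countP_pos_iff.mp hc))
    · rw [Nat.not_lt, Nat.le_zero] at hc
      have hex : (∃ a ∈ xs, a.testBit i = true) ↔ False :=
        iff_false_intro (by rw [← List.countP_pos_iff]; omega)
      rw [hex]
      simp [hc]

-- KEY: OR of everything-but-x, rebuilt from the shared-bit pass, given only a bit-count split
theorem pv_key (l p q : List Int) (x s : Int)
    (hcnt : ∀ i : Nat, l.countP (fun y => y.testBit i)
        = p.countP (fun y => y.testBit i) + (if x.testBit i = true then 1 else 0)
          + q.countP (fun y => y.testBit i)) :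
    PySem.Int.bor (PySem.Int.bor (p.foldl PySem.Int.bor 0) s) (q.foldl PySem.Int.bor 0)
      = PySem.Int.bor (PySem.Int.bor
          ((l.foldl (fun (st : Int × Int) y =>
              (PySem.Int.bor st.1 y, PySem.Int.bor st.2 (PySem.Int.band st.1 y))) (0, 0)).2)
          (PySem.Int.band (l.foldl PySem.Int.bor 0) (Int.not x))) s := by
  apply pv_ext
  intro i
  rw [Bool.eq_iff_iff]
  rw [pv_tb_bor, pv_tb_bor, pv_tb_bor, pv_tb_bor, pv_tb_band, pv_tb_not]
  simp only [Bool.or_eq_true, Bool.and_eq_true, Bool.not_eq_true']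
  have hq := pv_tb_fold i q 0
  have hp := pv_tb_fold i p 0
  have hl := pv_tb_fold i l 0
  have hm := pv_tb_multi i l 0 0
  rw [pv_tb_zero] at hp hq hl hm
  simp only [Bool.false_eq_true, false_or, false_and] at hp hq hl hm
  have hc := hcnt i
  constructor
  · rintro ((h | h) | h)
    · rw [hp] at h
      by_cases hx : x.testBit i = true
      · refine Or.inl (Or.inl (hm.mpr ?_))
        simp only [hx, if_true] at hc
        omega
      · refine Or.inl (Or.inr ⟨hl.mpr (by omega), by simpa using hx⟩)
    · exact Or.inr h
    · rw [hq] at h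
      by_cases hx : x.testBit i = true
      · refine Or.inl (Or.inl (hm.mpr ?_))
        simp only [hx, if_true] at hc
        omega
      · refine Or.inl (Or.inr ⟨hl.mpr (by omega), by simpa using hx⟩)
  · rintro ((h | ⟨ht, hx⟩) | h)
    · rw [hm] at h
      by_cases hx : x.testBit i = true
      · simp only [hx, if_true] at hc
        by_cases hpp : 0 < p.countP (fun y => y.testBit i)
        · exact Or.inl (Or.inl (hp.mpr hpp))
        · exact Or.inr (hq.mpr (by omega))
      · rw [Bool.not_eq_true] at hx
        simp only [hx, Bool.false_eq_true, if_false] at hc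
        by_cases hpp : 0 < p.countP (fun y => y.testBit i)
        · exact Or.inl (Or.inl (hp.mpr hpp))
        · exact Or.inr (hq.mpr (by omega))
    · rw [hl] at ht
      simp only [hx, Bool.false_eq_true, if_false] at hc
      by_cases hpp : 0 < p.countP (fun y => y.testBit i)
      · exact Or.inl (Or.inl (hp.mpr hpp))
      · exact Or.inr (hq.mpr (by omega))
    · exact Or.inl (Or.inr h)

-- ---- A-side structural lemmas (prefix/suffix loops) ----
theorem pv_foldl_congr {a b : Type} (l : List a) (f g : b -> a -> b) (init : b)
    (h : forall acc x, x ∈ l -> f acc x = g acc x) : l.foldl f init = l.foldl g init := by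
  induction l generalizing init with
  | nil => rfl
  | cons x xs ih =>
    simp only [List.foldl_cons]
    rw [h init x (by simp)]
    exact ih _ (fun acc z hz => h acc z (by simp [hz]))

theorem pv_scanl_head (t : Int) (xs : List Int) :
    t :: (List.scanl PySem.Int.bor t xs).tail = List.scanl PySem.Int.bor t xs := by
  cases xs <;> simp

theorem pv_pfx_loop (xs p : List Int) (t : Int) :
    xs.foldl (fun (st : List Int × Int) x =>
        (st.1 ++ [PySem.Int.bor st.2 x], PySem.Int.bor st.2 x)) (p, t)
      = (p ++ (List.scanl PySem.Int.bor t xs).tail, xs.foldl PySem.Int.bor t) := by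
  induction xs generalizing p t with
  | nil => simp
  | cons x xs ih => simp [List.scanl_cons, ih, List.append_assoc, pv_scanl_head]

theorem pv_suf_loop (xs : List Int) :
    ∀ (dq : List Int) (t : Int),
    (PySem.List.pyRange ((xs.length : Int) - 1) (-1) (-1)).foldl
        (fun (st : List Int × Int) i =>
          (PySem.Int.bor st.2 (PySem.List.pyGetD xs i 0) :: st.1,
           PySem.Int.bor st.2 (PySem.List.pyGetD xs i 0))) (dq, t)
      = ((List.scanl PySem.Int.bor t xs.reverse).tail.reverse ++ dq,
         xs.reverse.foldl PySem.Int.bor t) := by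
  induction xs using List.reverseRecOn with
  | nil =>
    intro dq t
    rw [show ((([] : List Int).length : Int) - 1) = -1 by simp,
        PySem.List.pyRange_neg_one_eq_nil (by norm_num)]
    simp
  | append_singleton ys y ih =>
    intro dq t
    rw [show (((ys ++ [y]).length : Int) - 1) = (ys.length : Int) by simp only [List.length_append, List.length_singleton]; push_cast; ring,
        PySem.List.pyRange_neg_one_cons (by omega)]
    simp only [List.foldl_cons]
    have hget : PySem.List.pyGetD (ys ++ [y]) ((ys.length : Int)) 0 = y := by
      rw [PySem.List.pyGetD_natCast]
      simp [List.getD]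
    rw [hget]
    rw [pv_foldl_congr _ _
        (fun (st : List Int × Int) i =>
          (PySem.Int.bor st.2 (PySem.List.pyGetD ys i 0) :: st.1,
           PySem.Int.bor st.2 (PySem.List.pyGetD ys i 0))) _
        (by
          intro acc i hi
          have hm := (PySem.List.mem_pyRange_neg_one).mp hi
          have h0 : 0 ≤ i := by omega
          have h1 : i < (ys.length : Int) := by omega
          have h1' : i < ((ys ++ [y]).length : Int) := by simp; omega
          have h1n : i.toNat < ys.length := by omega
          have he : PySem.List.pyGetD (ys ++ [y]) i 0 = PySem.List.pyGetD ys i 0 := by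
            rw [PySem.List.pyGetD_eq_getElem _ _ h0 (by simpa using h1'),
                PySem.List.pyGetD_eq_getElem _ _ h0 (by simpa using h1)]
            exact List.getElem_append_left h1n
          dsimp only
          rw [he])]
    rw [ih (PySem.Int.bor t y :: dq) (PySem.Int.bor t y)]
    rw [show (ys ++ [y]).reverse = y :: ys.reverse by simp]
    simp only [List.scanl_cons, List.tail_cons, List.foldl_cons]
    rw [← pv_scanl_head (PySem.Int.bor t y) ys.reverse]
    simp

theorem pv_scanl_getD (xs : List Int) :
    ∀ (t : Int) (i : Nat), i ≤ xs.length →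
    (List.scanl PySem.Int.bor t xs).getD i 0 = (xs.take i).foldl PySem.Int.bor t := by
  induction xs with
  | nil =>
    intro t i h
    have : i = 0 := Nat.le_zero.mp h
    subst this; simp
  | cons x xs ih =>
    intro t i h
    cases i with
    | zero => simp [List.scanl_cons]
    | succ j => simpa [List.scanl_cons] using ih (PySem.Int.bor t x) j (by simpa using h)

-- suffix table read: S[i] = OR of the last n-i elements (as a fold over reverse.take)
theorem pv_S_getD (nums : List Int) (i : Nat) (h : i ≤ nums.length) :
    ((List.scanl PySem.Int.bor 0 nums.reverse).reverse).getD i 0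
      = (nums.reverse.take (nums.length - i)).foldl PySem.Int.bor 0 := by
  have hlen : (List.scanl PySem.Int.bor 0 nums.reverse).length = nums.length + 1 := by simp
  have hi : i < (List.scanl PySem.Int.bor 0 nums.reverse).reverse.length := by simp; omega
  rw [List.getD_eq_getElem?_getD, List.getElem?_eq_getElem hi]
  simp only [Option.getD_some]
  rw [List.getElem_reverse]
  have h3 : (List.scanl PySem.Int.bor 0 nums.reverse).length - 1 - i = nums.length - i := by
    rw [hlen]; omega
  simp only [h3]
  have h4 : nums.length - i < (List.scanl PySem.Int.bor 0 nums.reverse).length := by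
    rw [hlen]; omega
  rw [← List.getD_eq_getElem _ 0 h4]
  exact pv_scanl_getD nums.reverse 0 (nums.length - i) (by simp)

-- bit-count split of the whole list at one index
theorem pv_cnt_split (nums : List Int) (a : Nat) (ha : a < nums.length) (f : Int → Bool) :
    nums.countP f = (nums.take a).countP f + (if f (nums[a]'ha) = true then 1 else 0)
      + (nums.reverse.take (nums.length - (a + 1))).countP f := by
  have h1 := @List.reverse_take _ nums.reverse (nums.length - (a + 1))
  rw [List.reverse_reverse, List.length_reverse,
      show nums.length - (nums.length - (a + 1)) = a + 1 by omega] at h1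
  have hrev : nums.reverse.take (nums.length - (a + 1)) = (nums.drop (a + 1)).reverse := by
    rw [← h1, List.reverse_reverse]
  rw [hrev, List.countP_reverse]
  conv_lhs => rw [← List.take_append_drop a nums, List.drop_eq_getElem_cons ha]
  rw [List.countP_append, List.countP_cons]
  have hd : nums.drop (a + 1) = (nums.drop a).tail := by
    rw [List.drop_eq_getElem_cons ha]
    rfl
  rw [hd, List.drop_eq_getElem_cons ha]
  simp only [List.tail_cons]
  by_cases hfa : f (nums[a]'ha) = true <;> simp [hfa] <;> try omega

-- main loop: A's indexed scan over the tables equals B's value scan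
theorem pv_main2 (nums : List Int) (k : Int) :
    ∀ (ys : List Int) (a : Nat) (ans pre : Int),
    nums.drop a = ys →
    pre = (nums.take a).foldl PySem.Int.bor 0 →
    (PySem.List.pyRange (a : Int) (nums.length : Int) 1).foldl
        (fun ans i =>
          max ans (PySem.Int.bor (PySem.Int.bor
                    (PySem.List.pyGetD (List.scanl PySem.Int.bor 0 nums) i 0)
                    ((PySem.List.pyGetD nums i 0) <<< k.toNat))
                   (PySem.List.pyGetD ((List.scanl PySem.Int.bor 0 nums.reverse).reverse) (i + 1) 0))) ans
      = ys.foldl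
          (fun ans x =>
            max ans (PySem.Int.bor (PySem.Int.bor
                      ((nums.foldl (fun (st : Int × Int) y =>
                          (PySem.Int.bor st.1 y, PySem.Int.bor st.2 (PySem.Int.band st.1 y))) (0, 0)).2)
                      (PySem.Int.band (nums.foldl PySem.Int.bor 0) (Int.not x)))
                     (x <<< k.toNat))) ans := by
  intro ys
  induction ys with
  | nil =>
    intro a ans pre hdrop hpre
    have hn : nums.length ≤ a := List.drop_eq_nil_iff.mp hdrop
    rw [PySem.List.pyRange_one_eq_nil (by exact_mod_cast hn)]
    simp
  | cons x ys' ih =>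
    intro a ans pre hdrop hpre
    have han : a < nums.length := by
      by_contra h
      rw [List.drop_eq_nil_iff.mpr (by omega)] at hdrop
      exact List.cons_ne_nil x ys' hdrop.symm
    have hx? : nums[a]? = some x := by
      have h0 : (nums.drop a)[0]? = some x := by rw [hdrop]; rfl
      rw [List.getElem?_drop] at h0
      simpa using h0
    have hxa : nums[a]'han = x := by
      rw [List.getElem?_eq_getElem han] at hx?
      simpa using hx?
    rw [PySem.List.pyRange_one_cons (by exact_mod_cast han)]
    simp only [List.foldl_cons]
    have hgn : PySem.List.pyGetD nums (a : Int) 0 = x := by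
      rw [PySem.List.pyGetD_natCast, List.getD_eq_getElem?_getD, hx?]; rfl
    have hgp : PySem.List.pyGetD (List.scanl PySem.Int.bor 0 nums) (a : Int) 0 = pre := by
      rw [PySem.List.pyGetD_natCast, pv_scanl_getD nums 0 a (le_of_lt han), hpre]
    have hgs : PySem.List.pyGetD ((List.scanl PySem.Int.bor 0 nums.reverse).reverse) ((a : Int) + 1) 0
        = (nums.reverse.take (nums.length - (a + 1))).foldl PySem.Int.bor 0 := by
      rw [show ((a : Int) + 1) = ((a + 1 : Nat) : Int) by push_cast; ring,
          PySem.List.pyGetD_natCast]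
      exact pv_S_getD nums (a + 1) (by omega)
    rw [hgn, hgp, hgs, hpre]
    rw [pv_key nums (nums.take a) (nums.reverse.take (nums.length - (a + 1))) x (x <<< k.toNat)
        (fun i => by simpa [hxa] using pv_cnt_split nums a han (fun y => y.testBit i))]
    have hdrop' : nums.drop (a + 1) = ys' := by
      have := congrArg (List.drop 1) hdrop
      rw [List.drop_drop] at this
      simpa [Nat.add_comm] using this
    have := ih (a + 1)
      (max ans (PySem.Int.bor (PySem.Int.bor
          ((nums.foldl (fun (st : Int × Int) y =>
              (PySem.Int.bor st.1 y, PySem.Int.bor st.2 (PySem.Int.band st.1 y))) (0, 0)).2)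
          (PySem.Int.band (nums.foldl PySem.Int.bor 0) (Int.not x)))
         (x <<< k.toNat)))
      ((nums.take (a + 1)).foldl PySem.Int.bor 0) hdrop' rfl
    rw [show ((a : Int) + 1) = ((a + 1 : Nat) : Int) by push_cast; ring]
    exact this

-- ===== VERDICT (by name: the statement is the Claim_ definition above) =====
set_option maxHeartbeats 1000000 in
theorem maximumOr_spec : Claim_equal_maximumOr := by
  intro nums k _hdom _hpre
  show maximumOr nums k = maximumOr_alt nums k
  unfold maximumOr maximumOr_alt
  simp only [PySem.List.len_eq]
  rw [PySem.List.foldl_pyRange_zero_pyGetD' nums 0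
      (fun (st : List Int × Int) v => (st.1 ++ [PySem.Int.bor st.2 v], PySem.Int.bor st.2 v))
      ([0], 0)]
  rw [pv_pfx_loop nums [0] 0]
  rw [pv_suf_loop nums []]
  dsimp only
  simp only [List.append_nil]
  have hS : ((List.scanl PySem.Int.bor 0 nums.reverse).tail.reverse ++ [0])
      = (List.scanl PySem.Int.bor 0 nums.reverse).reverse := by
    rw [← pv_scanl_head 0 nums.reverse]
    simp
  rw [hS]
  have h01 : [(0 : Int)] ++ (List.scanl PySem.Int.bor 0 nums).tail
      = List.scanl PySem.Int.bor 0 nums := by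
    simpa using pv_scanl_head 0 nums
  rw [h01]
  rw [pv_fold_fst nums 0 0]
  have := pv_main2 nums k nums 0 0 0 (by simp) (by simp)
  simpa using this
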